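-- pv_equiv track=rewrite | github.com/hongwj01/CSLParser | code/log_parser.py | align_template
-- ===== SOURCE A (Python) =====
-- def split_by_delimiters(text):
--     delimiters = [' ', '(', ')', '[', ']', '{', '}', ',', ';', '=']
--     result = []
--     start = 0
--     for i, char in enumerate(text):
--         if char in delimiters:
--             if start < i:
--                 result.append(text[start:i])
--             result.append(char)
--             start = i + 1
--     if start < len(text):
--         result.append(text[start:])
--     return result
--
-- def align_template(log, template):
--     delimiters = [' ', '(', ')', '[', ']', '{', '}', ',', ';', '=']
--     log_tokens = split_by_delimiters(log)
--     template_tokens = split_by_delimiters(template)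
--
--     if template.count('<*>') == len(log_tokens) - len(template_tokens) + template.count('<*>'):
--         return template
--
--     corrected_template = []
--     log_idx = 0
--     template_idx = 0
--
--     while log_idx < len(log_tokens) and template_idx < len(template_tokens):
--         if template_tokens[template_idx] == '<*>':
--             corrected_template.append('<*>')
--             log_idx += 1
--             template_idx += 1
--         else:
--             if log_tokens[log_idx] == template_tokens[template_idx]:
--                 corrected_template.append(template_tokens[template_idx])
--                 log_idx += 1
--                 template_idx += 1
--             else:
--                 if log_tokens[log_idx] not in delimiters:
--                     corrected_template.append('<*>')
--                 else:
--                     corrected_template.append(log_tokens[log_idx])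
--                 log_idx += 1
--
--     while log_idx < len(log_tokens):
--         if log_tokens[log_idx] not in delimiters:
--             corrected_template.append('<*>')
--         else:
--             corrected_template.append(log_tokens[log_idx])
--         log_idx += 1
--
--     return ''.join(corrected_template)
-- ===== SOURCE B (Python) =====
-- DELIMS = frozenset(' ()[]{},;=')
--
-- def _tokenize(text):
--     tokens = []
--     word = []
--     for ch in text:
--         if ch in DELIMS:
--             if word:
--                 tokens.append(''.join(word))
--                 word = []
--             tokens.append(ch)
--         else:
--             word.append(ch)
--     if word:
--         tokens.append(''.join(word))
--     return tokens
--
-- def align_template(log, template):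
--     log_tokens = _tokenize(log)
--     template_tokens = _tokenize(template)
--     if len(log_tokens) == len(template_tokens):
--         return template
--     out = []
--     ti = 0
--     for tok in log_tokens:
--         if ti < len(template_tokens) and (template_tokens[ti] == '<*>' or template_tokens[ti] == tok):
--             out.append(template_tokens[ti])
--             ti += 1
--         else:
--             out.append(tok if tok in DELIMS else '<*>')
--     return ''.join(out)
-- ===== Notes on version B (the rewrite author's own statement) =====
-- stated objective: simpler
-- what changed: The index/slice tokenizer becomes a single forward pass that buffers the current word and flushes it at delimiters, the early-return count identity is written as the plain length comparison it amounts to, and A's two alignment while-loops are merged into one fold over the log tokens.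
import Mathlib
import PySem

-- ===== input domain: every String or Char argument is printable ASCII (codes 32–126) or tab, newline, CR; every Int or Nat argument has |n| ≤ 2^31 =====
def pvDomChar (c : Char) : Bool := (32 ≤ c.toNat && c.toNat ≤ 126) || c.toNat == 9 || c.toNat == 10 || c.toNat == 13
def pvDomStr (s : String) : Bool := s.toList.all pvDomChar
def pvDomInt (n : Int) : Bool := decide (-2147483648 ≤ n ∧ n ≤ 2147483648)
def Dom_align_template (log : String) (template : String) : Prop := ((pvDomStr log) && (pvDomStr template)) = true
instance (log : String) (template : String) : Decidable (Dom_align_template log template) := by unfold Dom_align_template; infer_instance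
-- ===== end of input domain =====

-- B replaces A's index/slice tokenizer by a single forward pass with an in-word flag and
-- merges A's two alignment loops into one fold over the log tokens (objective: simpler).

-- ===== PORT A =====
-- Python compares a length-1 str against the 1-char delimiter strings; exact as Char membership.
def pyDelimChars : List Char := [' ', '(', ')', '[', ']', '{', '}', ',', ';', '=']
-- the same delimiters as the 1-char strings A tests tokens against
def pyDelimStrs : List String := [" ", "(", ")", "[", "]", "{", "}", ",", ";", "="]

def splitByDelimiters (text : String) : List String :=
  let cs := text.toList
  let st := (PySem.List.enumerate cs 0).foldl
    (fun (st : List String × Int) ic =>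
      if ic.2 ∈ pyDelimChars then
        let res := if st.2 < ic.1 then st.1 ++ [String.ofList (PySem.List.slice cs (some st.2) (some ic.1))] else st.1
        (res ++ [String.ofList [ic.2]], ic.1 + 1)
      else st) ([], 0)
  if st.2 < (cs.length : Int) then st.1 ++ [String.ofList (PySem.List.slice cs (some st.2) none)] else st.1

-- first while loop: returns (corrected_template, log_idx)
def alignLoop1 (lt tt : List String) (li ti : Nat) (acc : List String) : List String × Nat :=
  if _h : li < lt.length ∧ ti < tt.length then
    if tt.getD ti "" == "<*>" then alignLoop1 lt tt (li+1) (ti+1) (acc ++ ["<*>"])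
    else if lt.getD li "" == tt.getD ti "" then alignLoop1 lt tt (li+1) (ti+1) (acc ++ [tt.getD ti ""])
    else if lt.getD li "" ∉ pyDelimStrs then alignLoop1 lt tt (li+1) ti (acc ++ ["<*>"])
    else alignLoop1 lt tt (li+1) ti (acc ++ [lt.getD li ""])
  else (acc, li)
termination_by lt.length - li
decreasing_by all_goals exact Nat.sub_succ_lt_self _ _ _h.1

-- second while loop
def alignLoop2 (lt : List String) (li : Nat) (acc : List String) : List String :=
  if _h : li < lt.length then
    if lt.getD li "" ∉ pyDelimStrs then alignLoop2 lt (li+1) (acc ++ ["<*>"])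
    else alignLoop2 lt (li+1) (acc ++ [lt.getD li ""])
  else acc
termination_by lt.length - li
decreasing_by all_goals exact Nat.sub_succ_lt_self _ _ _h

def align_template (log : String) (template : String) : String :=
  let log_tokens := splitByDelimiters log
  let template_tokens := splitByDelimiters template
  if (PySem.Str.count template "<*>" : Int)
      = (log_tokens.length : Int) - (template_tokens.length : Int) + (PySem.Str.count template "<*>" : Int) then
    template
  else
    let p := alignLoop1 log_tokens template_tokens 0 0 []
    PySem.Str.join "" (alignLoop2 log_tokens p.2 p.1)

-- ===== PORT B =====
-- B's DELIMS = frozenset(' ()[]{},;='): the distinct delimiter characters, and the same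
-- delimiters viewed as the 1-char strings the align loop tests tokens against
def altDelimChars : List Char := " ()[]{},;=".toList
def altDelimStrs : List String := " ()[]{},;=".toList.map (fun c => String.ofList [c])

-- single forward pass: delimiters flush the pending word buffer, other chars extend it
def tokenizeAlt (text : String) : List String :=
  let st := text.toList.foldl (fun (st : List String × List Char) ch =>
      if ch ∈ altDelimChars then
        ((if st.2 ≠ [] then st.1 ++ [String.ofList st.2] else st.1) ++ [String.ofList [ch]], [])
      else (st.1, st.2 ++ [ch])) ([], [])
  if st.2 ≠ [] then st.1 ++ [String.ofList st.2] else st.1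

-- the body of B's single for-loop
def alignStep (tt : List String) (st : List String × Nat) (tok : String) : List String × Nat :=
  if st.2 < tt.length && (tt.getD st.2 "" == "<*>" || tt.getD st.2 "" == tok) then
    (st.1 ++ [tt.getD st.2 ""], st.2 + 1)
  else
    (st.1 ++ [if tok ∈ altDelimStrs then tok else "<*>"], st.2)

def align_template_alt (log : String) (template : String) : String :=
  let lt := tokenizeAlt log
  let tt := tokenizeAlt template
  if lt.length == tt.length then template
  else PySem.Str.join "" (lt.foldl (alignStep tt) ([], 0)).1

-- ===== PRECONDITION & SPEC =====
def Spec_align_template (log : String) (template : String) (out : String) : Prop := out = align_template_alt log template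
instance (log : String) (template : String) (out : String) : Decidable (Spec_align_template log template out) := by unfold Spec_align_template; infer_instance

-- ===== CLAIM (what is proved, stated in full; the proofs are below) =====
def Claim_equal_align_template : Prop := ∀ (log : String) (template : String), Dom_align_template log template → Spec_align_template log template (align_template log template)

-- ===== LEMMAS AND PROOFS =====

theorem delims_eq : altDelimStrs = pyDelimStrs := by decide

theorem delimChars_eq : altDelimChars = pyDelimChars := by decide

-- proof-only restatements of the two tokenizer loop bodies (definitionally the ports' lambdas)
def tokA_step (cs : List Char) (st : List String × Int) (ic : Int × Char) : List String × Int :=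
  if ic.2 ∈ pyDelimChars then
    let res := if st.2 < ic.1 then st.1 ++ [String.ofList (PySem.List.slice cs (some st.2) (some ic.1))] else st.1
    (res ++ [String.ofList [ic.2]], ic.1 + 1)
  else st

def tokAfin (cs : List Char) (st : List String × Int) : List String :=
  if st.2 < (cs.length : Int) then st.1 ++ [String.ofList (PySem.List.slice cs (some st.2) none)] else st.1

def tokB_step (st : List String × List Char) (ch : Char) : List String × List Char :=
  if ch ∈ altDelimChars then
    ((if st.2 ≠ [] then st.1 ++ [String.ofList st.2] else st.1) ++ [String.ofList [ch]], [])
  else (st.1, st.2 ++ [ch])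

def tokBfin (st : List String × List Char) : List String :=
  if st.2 ≠ [] then st.1 ++ [String.ofList st.2] else st.1

theorem splitBD_eq (text : String) : splitByDelimiters text
    = tokAfin text.toList ((PySem.List.enumerate text.toList 0).foldl (tokA_step text.toList) ([], 0)) := rfl

theorem tokAlt_eq (text : String) : tokenizeAlt text = tokBfin (text.toList.foldl tokB_step ([], [])) := rfl

theorem take_ext (cs : List Char) (st0 n : Nat) (h1 : st0 ≤ n) (h2 : n < cs.length) :
    (cs.drop st0).take (n + 1 - st0) = (cs.drop st0).take (n - st0) ++ [cs[n]] := by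
  have e1 : n + 1 - st0 = (n - st0) + 1 := by omega
  rw [e1, List.take_add_one, List.getElem?_drop]
  have e2 : st0 + (n - st0) = n := by omega
  rw [e2, List.getElem?_eq_getElem h2]
  rfl

theorem tok_aux (cs : List Char) : ∀ (m n st0 : Nat) (res : List String),
    cs.length - n = m → st0 ≤ n → n ≤ cs.length →
    tokAfin cs ((PySem.List.enumerate (cs.drop n) (n : Int)).foldl (tokA_step cs) (res, (st0 : Int)))
      = tokBfin ((cs.drop n).foldl tokB_step (res, (cs.drop st0).take (n - st0))) := by
  intro m
  induction m with
  | zero =>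
    intro n st0 res hm hs hn
    have hne : n = cs.length := by omega
    rw [List.drop_eq_nil_of_le (by omega), PySem.List.enumerate_nil, List.foldl_nil, List.foldl_nil]
    unfold tokAfin tokBfin
    dsimp only
    have hw : (cs.drop st0).take (n - st0) = cs.drop st0 := by
      apply List.take_of_length_le
      simp [hne]
    rw [hw]
    by_cases h : st0 < n
    · rw [if_pos (show (st0 : Int) < (cs.length : Int) from by exact_mod_cast (by omega : st0 < cs.length)),
        if_pos (by simp [List.drop_eq_nil_iff]; omega), PySem.List.slice_from_natCast]
    · rw [if_neg (show ¬ (st0 : Int) < (cs.length : Int) from by exact_mod_cast (by omega : ¬ st0 < cs.length)),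
        if_neg (by simp [List.drop_eq_nil_iff]; omega)]
  | succ m ih =>
    intro n st0 res hm hs hn
    have hk : n < cs.length := by omega
    rw [List.drop_eq_getElem_cons hk, PySem.List.enumerate_cons, List.foldl_cons, List.foldl_cons]
    set c := cs[n] with hc
    have ecast : ((n : Int) + 1) = ((n + 1 : Nat) : Int) := by push_cast; ring
    by_cases hd : c ∈ pyDelimChars
    · -- delimiter: both flush the pending word (if any) and emit the delimiter
      have hd' : c ∈ altDelimChars := by rw [delimChars_eq]; exact hd
      have hA : tokA_step cs (res, (st0 : Int)) ((n : Int), c)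
          = ((if st0 < n then res ++ [String.ofList ((cs.drop st0).take (n - st0))] else res)
              ++ [String.ofList [c]], ((n + 1 : Nat) : Int)) := by
        unfold tokA_step
        dsimp only
        rw [if_pos hd, PySem.List.slice_natCast, ecast]
        by_cases h : st0 < n
        · rw [if_pos (show (st0 : Int) < (n : Int) from by exact_mod_cast h), if_pos h]
        · rw [if_neg (show ¬ (st0 : Int) < (n : Int) from by exact_mod_cast h), if_neg h]
      have hB : tokB_step (res, (cs.drop st0).take (n - st0)) c
          = ((if st0 < n then res ++ [String.ofList ((cs.drop st0).take (n - st0))] else res)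
              ++ [String.ofList [c]], []) := by
        unfold tokB_step
        dsimp only
        rw [if_pos hd']
        by_cases h : st0 < n
        · rw [if_pos (by simp; omega), if_pos h]
        · rw [if_neg (by simp; omega), if_neg h]
      rw [hA, hB]
      have := ih (n + 1) (n + 1)
        ((if st0 < n then res ++ [String.ofList ((cs.drop st0).take (n - st0))] else res) ++ [String.ofList [c]])
        (by omega) (by omega) (by omega)
      simpa using this
    · -- non-delimiter: A's state is unchanged, B extends the pending word
      have hd' : c ∉ altDelimChars := by rw [delimChars_eq]; exact hd
      have hA : tokA_step cs (res, (st0 : Int)) ((n : Int), c) = (res, (st0 : Int)) := by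
        unfold tokA_step
        dsimp only
        rw [if_neg hd]
      have hB : tokB_step (res, (cs.drop st0).take (n - st0)) c
          = (res, (cs.drop st0).take (n + 1 - st0)) := by
        unfold tokB_step
        dsimp only
        rw [if_neg hd', ← take_ext cs st0 n (by omega) hk]
      rw [hA, hB, ecast]
      exact ih (n + 1) st0 res (by omega) (by omega) (by omega)

theorem tok_eq (text : String) : splitByDelimiters text = tokenizeAlt text := by
  rw [splitBD_eq, tokAlt_eq]
  have := tok_aux text.toList text.toList.length 0 0 [] rfl (by omega) (by omega)
  simpa using this

theorem loop2_eq (lt tt : List String) : ∀ (m k ti : Nat) (acc : List String),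
    lt.length - k = m → tt.length ≤ ti →
    alignLoop2 lt k acc = ((lt.drop k).foldl (alignStep tt) (acc, ti)).1 := by
  intro m
  induction m with
  | zero =>
    intro k ti acc hm hti
    rw [alignLoop2, dif_neg (by omega), List.drop_eq_nil_of_le (by omega)]
    rfl
  | succ m ih =>
    intro k ti acc hm hti
    have hk : k < lt.length := by omega
    have hgd : lt.getD k "" = lt[k] := List.getD_eq_getElem lt "" hk
    have hstep : alignStep tt (acc, ti) lt[k]
        = (acc ++ [if lt[k] ∈ altDelimStrs then lt[k] else "<*>"], ti) := by
      unfold alignStep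
      rw [if_neg]
      simp only [Bool.and_eq_true, decide_eq_true_eq]
      omega
    rw [alignLoop2, dif_pos hk, List.drop_eq_getElem_cons hk, List.foldl_cons, hstep, hgd,
      delims_eq]
    by_cases hmem : lt[k] ∈ pyDelimStrs
    · rw [if_neg (not_not.mpr hmem), if_pos hmem]
      exact ih (k+1) ti _ (by omega) hti
    · rw [if_pos hmem, if_neg hmem]
      exact ih (k+1) ti _ (by omega) hti

theorem loop1_eq (lt tt : List String) : ∀ (m k ti : Nat) (acc : List String),
    lt.length - k = m →
    alignLoop2 lt (alignLoop1 lt tt k ti acc).2 (alignLoop1 lt tt k ti acc).1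
      = ((lt.drop k).foldl (alignStep tt) (acc, ti)).1 := by
  intro m
  induction m with
  | zero =>
    intro k ti acc hm
    rw [alignLoop1, dif_neg (by omega)]
    rw [alignLoop2, dif_neg (by omega), List.drop_eq_nil_of_le (by omega)]
    rfl
  | succ m ih =>
    intro k ti acc hm
    have hk : k < lt.length := by omega
    by_cases hti : ti < tt.length
    · have hgt : tt.getD ti "" = tt[ti] := List.getD_eq_getElem tt "" hti
      have hgl : lt.getD k "" = lt[k] := List.getD_eq_getElem lt "" hk
      rw [alignLoop1, dif_pos ⟨hk, hti⟩, List.drop_eq_getElem_cons hk, List.foldl_cons, hgt, hgl]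
      by_cases h1 : tt[ti] = "<*>"
      · have hstep : alignStep tt (acc, ti) lt[k] = (acc ++ [tt[ti]], ti + 1) := by
          unfold alignStep
          rw [if_pos (by simp [hti, h1]), hgt]
        rw [if_pos (by simp [h1]), hstep, h1]
        exact ih (k+1) (ti+1) _ (by omega)
      · rw [if_neg (by simp [h1])]
        by_cases h2 : lt[k] = tt[ti]
        · have hstep : alignStep tt (acc, ti) lt[k] = (acc ++ [tt[ti]], ti + 1) := by
            unfold alignStep
            rw [if_pos (by simp [hti, h2]), hgt]
          rw [if_pos (by simp [h2]), hstep]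
          exact ih (k+1) (ti+1) _ (by omega)
        · have hstep : alignStep tt (acc, ti) lt[k]
              = (acc ++ [if lt[k] ∈ altDelimStrs then lt[k] else "<*>"], ti) := by
            unfold alignStep
            rw [if_neg (by
              simp only [hgt, Bool.and_eq_true, Bool.or_eq_true, beq_iff_eq, decide_eq_true_eq]
              rintro ⟨-, h | h⟩
              exacts [h1 h, h2 h.symm])]
          rw [if_neg (by simp [h2]), hstep, delims_eq]
          by_cases hmem : lt[k] ∈ pyDelimStrs
          · rw [if_neg (not_not.mpr hmem), if_pos hmem]
            exact ih (k+1) ti _ (by omega)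
          · rw [if_pos hmem, if_neg hmem]
            exact ih (k+1) ti _ (by omega)
    · rw [alignLoop1, dif_neg (by intro h; exact hti h.2)]
      exact loop2_eq lt tt (m+1) k ti acc hm (by omega)

theorem loops_eq (lt tt : List String) :
    alignLoop2 lt (alignLoop1 lt tt 0 0 []).2 (alignLoop1 lt tt 0 0 []).1
      = (lt.foldl (alignStep tt) ([], 0)).1 := by
  have := loop1_eq lt tt (lt.length) 0 0 [] (by omega)
  simpa using this

-- ===== VERDICT (by name: the statement is the Claim_ definition above) =====
theorem align_template_spec : Claim_equal_align_template := by
  intro log template _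
  unfold Spec_align_template align_template align_template_alt
  rw [tok_eq log, tok_eq template]
  by_cases h : (tokenizeAlt log).length = (tokenizeAlt template).length
  · simp only [h]
    rw [if_pos (by omega), if_pos (by simp)]
  · rw [if_neg (by omega), if_neg (by simp [h])]
    rw [← loops_eq]
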